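-- pv_equiv track=rewrite | github.com/Anandjeenkeri/Python | nearestpaliandrome.py | get_nearest_pali
-- ===== SOURCE A (Python) =====
-- def is_paliandrome(s):
-- 	return s[::-1] == s
--
-- def get_nearest_pali(s):
-- 	if is_paliandrome(s):
-- 		return s
--
-- 	if s[0] == s[-1]:
-- 		return s[0]+get_nearest_pali(s[1:])+s[-1]
-- 	else:
-- 		pa1_1 = s[0] + get_nearest_pali(s[1:])+s[0]
-- 		pa1_2 = s[-1] + get_nearest_pali(s[:-1])+s[-1]
--
-- 		if len(pa1_1) > len(pa1_2):
-- 			return pa1_2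
-- 		elif len(pa1_1) < len(pa1_2):
-- 			return pa1_1
-- 		return pa1_1 if pa1_1 < pa1_2 else pa1_2
-- ===== SOURCE B (Python) =====
-- def _solve(t, left, right):
--     # answer for substring t, given answers for t[:-1] (left) and t[1:] (right)
--     if t == t[::-1]:
--         return t
--     if t[0] == t[-1]:
--         return t[0] + right + t[-1]
--     p1 = t[0] + right + t[0]
--     p2 = t[-1] + left + t[-1]
--     if len(p1) > len(p2):
--         return p2
--     if len(p1) < len(p2):
--         return p1
--     return min(p1, p2)
--
-- def get_nearest_pali(s):
--     # bottom-up interval DP over substring spans: row[i] holds the answer for s[i:i+L]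
--     n = len(s)
--     row = [""] * (n + 1)
--     for L in range(1, n + 1):
--         row = [_solve(s[i:i + L], row[i], row[i + 1]) for i in range(n - L + 1)]
--     return row[0]
-- ===== Notes on version B (the rewrite author's own statement) =====
-- stated objective: faster
-- what changed: Replaced A's exponential top-down recursion (which re-solves the same substrings many times) by a bottom-up interval dynamic program over substring spans, keeping one row of answers per span length.
import Mathlib
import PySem

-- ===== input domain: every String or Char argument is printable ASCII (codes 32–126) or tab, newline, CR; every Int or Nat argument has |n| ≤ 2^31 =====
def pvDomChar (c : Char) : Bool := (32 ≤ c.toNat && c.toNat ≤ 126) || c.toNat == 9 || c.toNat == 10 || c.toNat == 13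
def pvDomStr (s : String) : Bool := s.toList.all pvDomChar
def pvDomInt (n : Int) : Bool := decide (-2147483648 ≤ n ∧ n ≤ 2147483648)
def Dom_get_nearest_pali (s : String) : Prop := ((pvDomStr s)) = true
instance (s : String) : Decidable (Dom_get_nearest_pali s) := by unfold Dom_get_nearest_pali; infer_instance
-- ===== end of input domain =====

-- B replaces A's exponential branching recursion by a bottom-up interval DP over substring spans (objective: faster).

-- Python's '<' on strings: lexicographic comparison of code points (shared comparison primitive).
def pvLt : List Char → List Char → Bool
  | [], [] => false
  | [], _ :: _ => true
  | _ :: _, [] => false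
  | a :: as, b :: bs => if a < b then true else if b < a then false else pvLt as bs

-- ===== PORT A =====
-- A's recursion, over the character list of s (s[1:] = tail, s[:-1] = dropLast, s[-1] = getLast).
def pvPaliA : List Char → List Char
  | [] => []                                            -- "" is a palindrome: returned as is
  | a :: rest =>
    if (a :: rest).reverse = a :: rest then a :: rest   -- is_paliandrome(s)
    else
      let b := (a :: rest).getLast (List.cons_ne_nil _ _)
      if a = b then
        a :: pvPaliA rest ++ [b]
      else
        let p1 := a :: pvPaliA rest ++ [a]
        let p2 := b :: pvPaliA ((a :: rest).dropLast) ++ [b]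
        if p1.length > p2.length then p2
        else if p1.length < p2.length then p1
        else if pvLt p1 p2 then p1 else p2
termination_by l => l.length
decreasing_by
  · simp
  · simp
  · simp [List.length_dropLast]

def get_nearest_pali (s : String) : String := String.ofList (pvPaliA s.toList)

-- ===== PORT B =====
-- _solve(t, left, right): answer for t from the answers for t[:-1] (left) and t[1:] (right).
def pvSolve (t left right : List Char) : List Char :=
  match t with
  | [] => []
  | a :: rest =>
    if (a :: rest).reverse = a :: rest then a :: rest
    else
      let b := (a :: rest).getLast (List.cons_ne_nil _ _)
      if a = b then a :: right ++ [b]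
      else
        let p1 := a :: right ++ [a]
        let p2 := b :: left ++ [b]
        if p1.length > p2.length then p2
        else if p1.length < p2.length then p1
        else if pvLt p2 p1 then p2 else p1              -- min(p1, p2)

-- one pass of the loop body: from the row of span-L answers to the row of span-(L+1) answers
def pvRowStep (cs : List Char) (row : List (List Char)) (L : Nat) : List (List Char) :=
  (List.range (cs.length - L + 1)).map
    (fun i => pvSolve ((cs.drop i).take L) (row.getD i []) (row.getD (i + 1) []))

def get_nearest_pali_alt (s : String) : String :=
  let cs := s.toList
  let n := cs.length
  let row := (List.range n).foldl (fun row L => pvRowStep cs row (L + 1))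
      (List.replicate (n + 1) ([] : List Char))
  String.ofList (row.getD 0 [])

-- ===== PRECONDITION & SPEC =====
def Spec_get_nearest_pali (s : String) (out : String) : Prop := out = get_nearest_pali_alt s
instance (s : String) (out : String) : Decidable (Spec_get_nearest_pali s out) := by unfold Spec_get_nearest_pali; infer_instance

-- ===== CLAIM (what is proved, stated in full; the proofs are below) =====
def Claim_equal_get_nearest_pali : Prop := ∀ (s : String), Dom_get_nearest_pali s → Spec_get_nearest_pali s (get_nearest_pali s)

-- ===== LEMMAS AND PROOFS =====

theorem pvLt_asymm : ∀ {a b : List Char}, pvLt a b = true → pvLt b a = false := by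
  intro a b h
  induction a generalizing b with
  | nil => cases b <;> simp [pvLt] at h ⊢
  | cons x xs ih =>
    cases b with
    | nil => simp [pvLt] at h
    | cons y ys =>
      by_cases h1 : x < y
      · simp [pvLt, h1, lt_asymm h1]
      · by_cases h2 : y < x
        · simp [pvLt, h1, h2] at h
        · simp [pvLt, h1, h2] at h ⊢
          exact ih h

theorem pvLt_antisymm : ∀ {a b : List Char}, pvLt a b = false → pvLt b a = false → a = b := by
  intro a b h1 h2
  induction a generalizing b with
  | nil => cases b <;> simp_all [pvLt]
  | cons x xs ih =>
    cases b with
    | nil => simp [pvLt] at h2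
    | cons y ys =>
      by_cases ha : x < y
      · simp [pvLt, ha] at h1
      · by_cases hb : y < x
        · simp [pvLt, hb] at h2
        · simp [pvLt, ha, hb] at h1 h2
          rw [le_antisymm (not_lt.mp hb) (not_lt.mp ha)]
          exact congrArg (y :: ·) (ih h1 h2)

-- A's recursion step, expressed through pvSolve
theorem pvPaliA_eq_solve (a : Char) (rest : List Char) :
    pvPaliA (a :: rest) =
      pvSolve (a :: rest) (pvPaliA ((a :: rest).dropLast)) (pvPaliA rest) := by
  rw [pvPaliA, pvSolve]
  split
  · rfl
  · set b := (a :: rest).getLast (List.cons_ne_nil _ _) with hb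
    by_cases hab : a = b
    · simp [hab]
    · simp only [if_neg hab]
      set p1 := a :: pvPaliA rest ++ [a] with hp1
      set p2 := b :: pvPaliA ((a :: rest).dropLast) ++ [b] with hp2
      rcases Nat.lt_trichotomy p1.length p2.length with hl | hl | hl
      · simp [Nat.not_lt_of_lt hl, hl]
      · simp only [hl, lt_irrefl, if_false]
        cases h12 : pvLt p1 p2 with
        | true => simp [pvLt_asymm h12]
        | false =>
          cases h21 : pvLt p2 p1 with
          | true => simp
          | false => simp [pvLt_antisymm h12 h21]
      · simp [hl]

theorem pvGetD_map_range {α : Type} (m : Nat) (f : Nat → α) (i : Nat) (d : α) (h : i < m) :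
    ((List.range m).map f).getD i d = f i := by
  rw [List.getD_eq_getElem?_getD]
  simp [h]

theorem pvTail_drop_take (cs : List Char) (i L : Nat) :
    ((cs.drop i).take (L + 1)).tail = (cs.drop (i + 1)).take L := by
  rw [← List.tail_drop]
  cases cs.drop i <;> simp

theorem pvDropLast_take (cs : List Char) (i L : Nat) (h : i + (L + 1) ≤ cs.length) :
    ((cs.drop i).take (L + 1)).dropLast = (cs.drop i).take L := by
  rw [List.dropLast_eq_take, List.take_take]
  congr 1
  have hlen : ((cs.drop i).take (L + 1)).length = L + 1 := by
    simp; omega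
  rw [hlen]
  omega

-- the row invariant: after L loop iterations, entry i is A's answer for s[i:i+L]
theorem pvRows_spec (cs : List Char) :
    ∀ L, L ≤ cs.length →
      (List.range L).foldl (fun row l => pvRowStep cs row (l + 1))
          (List.replicate (cs.length + 1) ([] : List Char)) =
        (List.range (cs.length - L + 1)).map (fun i => pvPaliA ((cs.drop i).take L)) := by
  intro L
  induction L with
  | zero =>
    intro _
    apply List.ext_getElem <;> simp [pvPaliA]
  | succ L ih =>
    intro hL
    rw [List.range_succ, List.foldl_append, ih (by omega), List.foldl_cons, List.foldl_nil]
    unfold pvRowStep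
    apply List.ext_getElem
    · simp
    · intro i h1 h2
      simp only [List.getElem_map, List.getElem_range]
      simp only [List.length_map, List.length_range] at h2
      have hi : i + (L + 1) ≤ cs.length := by omega
      rw [pvGetD_map_range _ _ _ _ (by omega : i < cs.length - L + 1),
          pvGetD_map_range _ _ _ _ (by omega : i + 1 < cs.length - L + 1),
          ← pvDropLast_take cs i L hi, ← pvTail_drop_take cs i L]
      cases ht : (cs.drop i).take (L + 1) with
      | nil =>
        have := congrArg List.length ht
        simp at this
        omega
      | cons a rest =>
        rw [pvPaliA_eq_solve]
        simp
-- ===== VERDICT (by name: the statement is the Claim_ definition above) =====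
theorem get_nearest_pali_spec : Claim_equal_get_nearest_pali := by
  intro s _
  show get_nearest_pali s = get_nearest_pali_alt s
  unfold get_nearest_pali get_nearest_pali_alt
  dsimp only
  rw [pvRows_spec s.toList s.toList.length (le_refl _),
      pvGetD_map_range _ _ 0 [] (by omega)]
  rw [List.drop_zero, List.take_of_length_le (by simp)]
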